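-- pv_equiv track=rewrite | github.com/emaric/advent-of-code | 2024/shared/util.py | strs
-- ===== SOURCE A (Python) =====
-- def strs(
--     string: str,
--     maxchars: int = 0,
-- ):
--     """Returns list of all strings in string
--
--     Searches string for connected alphabetic chars flanked by non alpha  characters
--
--     ### maxchars (0):\n
--         max number of chars that each string is allowed to have
--         0 -> unlimited chars
--     """
--     strlist = []
--     tempString = []
--     count = 0
--     for idx, c in enumerate(string):
--         if str(c).isalpha():
--             tempString.append(c)
--             count += 1
--             if count == maxchars:
--                 strlist.append("".join(tempString))
--                 tempString = []
--                 count = 0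
--         else:
--             if count >= 1:
--                 strlist.append("".join(tempString))
--                 tempString = []
--                 count = 0
--
--     if count >= 1:
--         strlist.append("".join(tempString))
--     return strlist
-- ===== SOURCE B (Python) =====
-- from itertools import groupby
--
--
-- def strs(
--     string: str,
--     maxchars: int = 0,
-- ):
--     out = []
--     for is_alpha, grp in groupby(string, key=lambda c: c.isalpha()):
--         if not is_alpha:
--             continue
--         run = "".join(grp)
--         if maxchars < 1:
--             out.append(run)
--         else:
--             while run:
--                 out.append(run[:maxchars])
--                 run = run[maxchars:]
--     return out
-- ===== Notes on version B (the rewrite author's own statement) =====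
-- stated objective: simpler
-- what changed: Replaces A's single character-by-character loop with interleaved temp-buffer/counter state by a two-phase decomposition: group the string into alphabetic runs (itertools.groupby), then chunk each run by slicing when maxchars >= 1.
import Mathlib
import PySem

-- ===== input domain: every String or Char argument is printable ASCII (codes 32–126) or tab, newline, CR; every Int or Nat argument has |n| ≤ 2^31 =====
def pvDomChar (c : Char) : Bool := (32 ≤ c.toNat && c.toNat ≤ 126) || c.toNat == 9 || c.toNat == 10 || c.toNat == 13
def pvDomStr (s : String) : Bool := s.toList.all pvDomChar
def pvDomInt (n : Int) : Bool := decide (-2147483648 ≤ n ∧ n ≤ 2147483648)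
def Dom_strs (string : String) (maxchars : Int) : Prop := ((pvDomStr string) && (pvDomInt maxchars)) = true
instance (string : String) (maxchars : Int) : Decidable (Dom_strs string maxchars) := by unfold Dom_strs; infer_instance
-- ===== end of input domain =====

-- B replaces A's single interleaved character loop by a two-phase decomposition
-- (extract the alphabetic runs, then chunk each run); objective: simpler.

-- ===== PORT A =====
-- the for-loop of A, state (acc = strlist, temp = tempString, count), plus the trailing flush
def strsLoop (m : Int) : List Char → List String → List Char → Int → List String
  | [], acc, temp, count =>
      if count ≥ 1 then acc ++ [String.ofList temp] else acc
  | c :: cs, acc, temp, count =>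
      if PySem.Chars.isalpha c then
        if count + 1 == m then
          strsLoop m cs (acc ++ [String.ofList (temp ++ [c])]) [] 0
        else
          strsLoop m cs acc (temp ++ [c]) (count + 1)
      else
        if count ≥ 1 then strsLoop m cs (acc ++ [String.ofList temp]) [] 0
        else strsLoop m cs acc temp count

def strs (string : String) (maxchars : Int) : List String :=
  strsLoop maxchars string.toList [] [] 0

-- ===== PORT B =====
-- the alphabetic runs of the string, in order (the alpha groups of B's groupby)
def alphaRuns : List Char → List (List Char)
  | [] => []
  | c :: cs =>
      if PySem.Chars.isalpha c then
        (c :: cs.takeWhile PySem.Chars.isalpha) :: alphaRuns (cs.dropWhile PySem.Chars.isalpha)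
      else
        alphaRuns cs
termination_by cs => cs.length
decreasing_by
  · have := List.length_dropWhile_le PySem.Chars.isalpha cs
    simp; omega
  · simp

-- B's while loop: cut a run into pieces of size m+1 (run[:maxchars] / run[maxchars:])
def chunkS (m : Nat) : List Char → List String
  | [] => []
  | c :: cs => String.ofList (c :: cs.take m) :: chunkS m (cs.drop m)
termination_by cs => cs.length
decreasing_by
  simp

def strs_alt (string : String) (maxchars : Int) : List String :=
  (alphaRuns string.toList).flatMap fun run =>
    if maxchars < 1 then [String.ofList run] else chunkS (maxchars.toNat - 1) run

-- ===== PRECONDITION & SPEC =====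
def Spec_strs (string : String) (maxchars : Int) (out : List String) : Prop := out = strs_alt string maxchars
instance (string : String) (maxchars : Int) (out : List String) : Decidable (Spec_strs string maxchars out) := by unfold Spec_strs; infer_instance

-- ===== CLAIM (what is proved, stated in full; the proofs are below) =====
def Claim_equal_strs : Prop := ∀ (string : String) (maxchars : Int), Dom_strs string maxchars → Spec_strs string maxchars (strs string maxchars)

-- ===== LEMMAS AND PROOFS =====

@[simp] theorem chunkS_nil (m : Nat) : chunkS m [] = [] := by simp [chunkS]

-- skipping a non-alphabetic head leaves the runs unchanged
theorem alphaRuns_cons_neg {c : Char} (h : ¬ PySem.Chars.isalpha c) (cs : List Char) :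
    alphaRuns (c :: cs) = alphaRuns cs := by
  simp [alphaRuns, h]

-- flatMap over the runs peels off the leading run
theorem flat_alphaRuns (f : List Char → List String)
    (hnil : f [] = []) (cs : List Char) :
    (alphaRuns cs).flatMap f
      = f (cs.takeWhile PySem.Chars.isalpha)
        ++ (alphaRuns (cs.dropWhile PySem.Chars.isalpha)).flatMap f := by
  cases cs with
  | nil => simp [alphaRuns, hnil]
  | cons c cs =>
    by_cases h : PySem.Chars.isalpha c <;>
      simp [alphaRuns, h, List.takeWhile, List.dropWhile, hnil]

-- map over the runs peels off the leading run
theorem map_alphaRuns (cs : List Char) :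
    (alphaRuns cs).map String.ofList
      = (if cs.takeWhile PySem.Chars.isalpha = [] then []
         else [String.ofList (cs.takeWhile PySem.Chars.isalpha)])
        ++ (alphaRuns (cs.dropWhile PySem.Chars.isalpha)).map String.ofList := by
  cases cs with
  | nil => simp [alphaRuns]
  | cons c cs =>
    by_cases h : PySem.Chars.isalpha c <;>
      simp [alphaRuns, h, List.takeWhile, List.dropWhile]

-- a nonempty list whose length is at most m+1 is one chunk
theorem chunkS_small (m : Nat) (l : List Char) (h0 : l ≠ []) (h : l.length ≤ m + 1) :
    chunkS m l = [String.ofList l] := by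
  cases l with
  | nil => exact absurd rfl h0
  | cons c cs =>
    have hle : cs.length ≤ m := by simpa using h
    simp [chunkS, List.take_of_length_le hle, List.drop_of_length_le hle]

-- a full chunk splits off the front
theorem chunkS_full (m : Nat) (l r : List Char) (h : l.length = m + 1) :
    chunkS m (l ++ r) = String.ofList l :: chunkS m r := by
  cases l with
  | nil => simp at h
  | cons c cs =>
    have hcs : cs.length = m := by simpa using h
    subst hcs
    simp [chunkS]


-- main invariant for maxchars ≥ 1: loop state (temp, count) with count = |temp| < m
theorem loop_eq_chunks (m : Int) (hm : 1 ≤ m) (cs : List Char) :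
    ∀ (acc : List String) (temp : List Char), (temp.length : Int) < m →
      strsLoop m cs acc temp temp.length
        = acc ++ chunkS (m.toNat - 1) (temp ++ cs.takeWhile PySem.Chars.isalpha)
            ++ (alphaRuns (cs.dropWhile PySem.Chars.isalpha)).flatMap (chunkS (m.toNat - 1)) := by
  induction cs with
  | nil =>
      intro acc temp hlt
      simp only [List.takeWhile_nil, List.dropWhile_nil, List.append_nil]
      by_cases h0 : temp = []
      · subst h0; simp [strsLoop, alphaRuns]
      · have h1 : (1:Int) ≤ (temp.length : Int) := by
          have := List.length_pos_iff.mpr h0; exact_mod_cast this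
        rw [chunkS_small (m.toNat - 1) temp h0 (by omega)]
        simp [strsLoop, alphaRuns, h1]
  | cons c cs ih =>
      intro acc temp hlt
      by_cases h : PySem.Chars.isalpha c
      · by_cases hfull : (temp.length : Int) + 1 = m
        · have hlen : (temp ++ [c]).length = (m.toNat - 1) + 1 := by
            simp; omega
          have e : strsLoop m (c :: cs) acc temp temp.length
              = strsLoop m cs (acc ++ [String.ofList (temp ++ [c])]) [] 0 := by
            simp [strsLoop, h, hfull]
          rw [e]
          have := ih (acc ++ [String.ofList (temp ++ [c])]) [] (by simpa using hm)
          simp only [List.length_nil, Int.natCast_zero, List.nil_append] at this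
          rw [this, List.takeWhile_cons_of_pos (by simpa using h),
              List.dropWhile_cons_of_pos (by simpa using h),
              show temp ++ c :: cs.takeWhile PySem.Chars.isalpha
                 = (temp ++ [c]) ++ cs.takeWhile PySem.Chars.isalpha by simp,
              chunkS_full _ _ _ hlen]
          simp
        · have e : strsLoop m (c :: cs) acc temp temp.length
              = strsLoop m cs acc (temp ++ [c]) (temp.length + 1) := by
            simp [strsLoop, h, hfull]
          rw [e]
          have hc : ((temp ++ [c]).length : Int) = (temp.length : Int) + 1 := by simp
          have := ih acc (temp ++ [c]) (by rw [hc]; omega)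
          rw [hc] at this
          rw [this, List.takeWhile_cons_of_pos (by simpa using h),
              List.dropWhile_cons_of_pos (by simpa using h)]
          simp
      · rw [List.takeWhile_cons_of_neg (by simpa using h),
            List.dropWhile_cons_of_neg (by simpa using h),
            alphaRuns_cons_neg h cs,
            flat_alphaRuns (chunkS (m.toNat - 1)) (chunkS_nil _) cs]
        by_cases h0 : temp = []
        · subst h0
          simp only [List.length_nil, Int.natCast_zero]
          rw [show strsLoop m (c :: cs) acc [] 0 = strsLoop m cs acc [] 0 from by
            simp [strsLoop, h]]
          have := ih acc [] (by simpa using hm)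
          simp only [List.length_nil, Int.natCast_zero, List.nil_append] at this
          rw [this]
          simp
        · have h1 : (1:Int) ≤ (temp.length : Int) := by
            have := List.length_pos_iff.mpr h0; exact_mod_cast this
          have e : strsLoop m (c :: cs) acc temp temp.length
              = strsLoop m cs (acc ++ [String.ofList temp]) [] 0 := by
            simp [strsLoop, h, h1]
          rw [e]
          have := ih (acc ++ [String.ofList temp]) [] (by simpa using hm)
          simp only [List.length_nil, Int.natCast_zero, List.nil_append] at this
          rw [this, List.append_nil, chunkS_small (m.toNat - 1) temp h0 (by omega)]
          simp

-- main invariant for maxchars < 1: no splitting, runs come out whole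
theorem loop_eq_runs (m : Int) (hm : m < 1) (cs : List Char) :
    ∀ (acc : List String) (temp : List Char),
      strsLoop m cs acc temp temp.length
        = acc ++ (if temp ++ cs.takeWhile PySem.Chars.isalpha = [] then []
                  else [String.ofList (temp ++ cs.takeWhile PySem.Chars.isalpha)])
            ++ (alphaRuns (cs.dropWhile PySem.Chars.isalpha)).map String.ofList := by
  induction cs with
  | nil =>
      intro acc temp
      by_cases h0 : temp = []
      · subst h0; simp [strsLoop, alphaRuns]
      · have h1 : (1:Int) ≤ (temp.length : Int) := by
          have := List.length_pos_iff.mpr h0; exact_mod_cast this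
        simp [strsLoop, alphaRuns, h1, h0]
  | cons c cs ih =>
      intro acc temp
      by_cases h : PySem.Chars.isalpha c
      · have hne : (temp.length : Int) + 1 ≠ m := by omega
        have e : strsLoop m (c :: cs) acc temp temp.length
            = strsLoop m cs acc (temp ++ [c]) (temp.length + 1) := by
          simp [strsLoop, h, hne]
        rw [e]
        have hc : ((temp ++ [c]).length : Int) = (temp.length : Int) + 1 := by simp
        have := ih acc (temp ++ [c])
        rw [hc] at this
        rw [this, List.takeWhile_cons_of_pos (by simpa using h),
            List.dropWhile_cons_of_pos (by simpa using h)]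
        simp
      · rw [List.takeWhile_cons_of_neg (by simpa using h),
            List.dropWhile_cons_of_neg (by simpa using h),
            alphaRuns_cons_neg h cs, map_alphaRuns cs]
        by_cases h0 : temp = []
        · subst h0
          simp only [List.length_nil, Int.natCast_zero]
          rw [show strsLoop m (c :: cs) acc [] 0 = strsLoop m cs acc [] 0 from by
            simp [strsLoop, h]]
          have := ih acc []
          simp only [List.length_nil, Int.natCast_zero, List.nil_append] at this
          rw [this]
          simp
        · have h1 : (1:Int) ≤ (temp.length : Int) := by
            have := List.length_pos_iff.mpr h0; exact_mod_cast this
          have e : strsLoop m (c :: cs) acc temp temp.length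
              = strsLoop m cs (acc ++ [String.ofList temp]) [] 0 := by
            simp [strsLoop, h, h1]
          rw [e]
          have := ih (acc ++ [String.ofList temp]) []
          simp only [List.length_nil, Int.natCast_zero, List.nil_append] at this
          rw [this]
          simp [h0]

-- ===== VERDICT (by name: the statement is the Claim_ definition above) =====
theorem strs_spec : Claim_equal_strs := by
  intro string maxchars _
  unfold Spec_strs strs strs_alt
  by_cases hm : maxchars < 1
  · have hflat : ((alphaRuns string.toList).flatMap fun run =>
        if maxchars < 1 then [String.ofList run] else chunkS (maxchars.toNat - 1) run)
        = (alphaRuns string.toList).map String.ofList := by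
      simp only [hm, if_true]
      generalize alphaRuns string.toList = l
      induction l with
      | nil => simp
      | cons a l ih => simp [ih]
    rw [hflat]
    have := loop_eq_runs maxchars hm string.toList [] []
    simp only [List.length_nil, Int.natCast_zero, List.nil_append] at this
    rw [this, map_alphaRuns string.toList]
  · have hm1 : 1 ≤ maxchars := by omega
    have hflat : ((alphaRuns string.toList).flatMap fun run =>
        if maxchars < 1 then [String.ofList run] else chunkS (maxchars.toNat - 1) run)
        = (alphaRuns string.toList).flatMap (chunkS (maxchars.toNat - 1)) := by
      simp [hm]
    rw [hflat]
    have := loop_eq_chunks maxchars hm1 string.toList [] [] (by simpa using hm1)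
    simp only [List.length_nil, Int.natCast_zero, List.nil_append] at this
    rw [this, flat_alphaRuns (chunkS (maxchars.toNat - 1)) (chunkS_nil _) string.toList]
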